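-- pv_equiv track=rewrite | github.com/flours/python-vim | algorithms/F2sweep/body.py | F2sweep
-- ===== SOURCE A (Python) =====
-- def F2sweep(l):
--     cnt = 0
--     for i in range(len(l[0])):
--         # 0じゃないところを上に持ってくる
--         for j in range(cnt, len(l)):
--             if l[j][i] != 0:
--                 l[cnt], l[j] = l[j], l[cnt]
--                 break
--         if l[cnt][i] == 0:
--             continue
--         # この時点ですでに1なので割り算はいらない
--         for j in range(len(l)):
--             if j == cnt:
--                 continue
--             if l[j][i] != 0:
--                 for k in range(len(l[cnt])):
--                     l[j][k] -= l[cnt][k]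
--                     l[j][k] %= 2
--         cnt += 1
--         if cnt == len(l):
--             break
--     return l
-- ===== SOURCE B (Python) =====
-- def F2sweep(l):
--     # Same return value as A; mutates the outer list in place (rows are rebuilt fresh).
--     done, rest = [], list(l)
--     for i in range(len(l[0])):
--         if not rest:
--             break
--         j = next((k for k, r in enumerate(rest) if r[i] != 0), None)
--         if j is None:
--             continue
--         piv = rest[j]
--         rest[j] = rest[0]
--         rest = rest[1:]
--         f = lambda r: [(x - p) % 2 for x, p in zip(r, piv)] if r[i] != 0 else r
--         done = [f(r) for r in done] + [piv]
--         rest = [f(r) for r in rest]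
--     l[:] = done + rest
--     return l
-- ===== Notes on version B (the rewrite author's own statement) =====
-- stated objective: alternative
-- what changed: Replaces A's single in-place index-juggling matrix with a done/rest two-list decomposition: the pivot is popped from rest, and both segments are rebuilt functionally with comprehensions and zip instead of triple-nested index loops with per-element in-place updates.
-- outside the precondition, e.g. on F2sweep([[1, 1], [1, 5, 7]]): A returns [[1, 1], [0, 0, 7]], B returns [[1, 1], [0, 0]]
import Mathlib
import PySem

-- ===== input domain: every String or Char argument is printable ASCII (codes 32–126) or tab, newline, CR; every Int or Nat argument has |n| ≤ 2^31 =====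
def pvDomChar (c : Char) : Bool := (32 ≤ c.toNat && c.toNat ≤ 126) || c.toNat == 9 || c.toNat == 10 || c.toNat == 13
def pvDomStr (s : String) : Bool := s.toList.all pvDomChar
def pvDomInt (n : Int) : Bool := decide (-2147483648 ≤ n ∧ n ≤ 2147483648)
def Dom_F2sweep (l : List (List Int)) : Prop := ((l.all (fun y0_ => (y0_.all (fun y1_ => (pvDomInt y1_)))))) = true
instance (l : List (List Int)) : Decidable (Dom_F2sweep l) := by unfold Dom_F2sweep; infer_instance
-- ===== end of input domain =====

-- B rebuilds the matrix as two lists (eliminated prefix / remaining rows) with comprehensions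
-- instead of A's in-place index loops; equivalence is about the RETURN value (both Pythons also
-- mutate the argument list in place).

-- ===== PORT A =====

-- entry l[j][i] (in-range on Pre_ inputs)
def pvEntryA (m : List (List Int)) (j i : Nat) : Int := (m.getD j []).getD i 0

-- 'for j in range(cnt, len(l)): if l[j][i] != 0: <swap>; break' — the search part
def pvSearchA (m : List (List Int)) (i : Nat) : List Nat → Option Nat
  | [] => none
  | j :: js => if pvEntryA m j i ≠ 0 then some j else pvSearchA m i js

-- 'for k in range(len(l[cnt])): l[j][k] -= l[cnt][k]; l[j][k] %= 2'
def pvElimRowA (piv row : List Int) : List Int :=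
  (List.range piv.length).foldl
    (fun r k => r.set k (PySem.Int.mod (r.getD k 0 - piv.getD k 0) 2)) row

-- 'for j in range(len(l)): if j == cnt: continue; if l[j][i] != 0: <row update>'
def pvElimAllA (m : List (List Int)) (cnt i : Nat) : List (List Int) :=
  (List.range m.length).foldl
    (fun acc j =>
      if j = cnt then acc
      else if pvEntryA acc j i ≠ 0 then
        acc.set j (pvElimRowA (acc.getD cnt []) (acc.getD j []))
      else acc) m

-- the outer 'for i in range(len(l[0]))' with cnt, continue and the two breaks
def pvLoopA (m : List (List Int)) (cnt : Nat) : List Nat → List (List Int)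
  | [] => m
  | i :: is =>
    let m1 := match pvSearchA m i (List.range' cnt (m.length - cnt)) with
      | some j => (m.set cnt (m.getD j [])).set j (m.getD cnt [])
      | none => m
    if pvEntryA m1 cnt i = 0 then pvLoopA m1 cnt is
    else
      let m2 := pvElimAllA m1 cnt i
      if cnt + 1 = m2.length then m2 else pvLoopA m2 (cnt + 1) is

def F2sweep (l : List (List Int)) : List (List Int) :=
  pvLoopA l 0 (List.range (l.getD 0 []).length)

-- ===== PORT B =====

-- 'lambda r: [(x - p) % 2 for x, p in zip(r, piv)] if r[i] != 0 else r'
def pvElimRowB (i : Nat) (piv row : List Int) : List Int :=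
  if row.getD i 0 ≠ 0 then List.zipWith (fun x p => PySem.Int.mod (x - p) 2) row piv else row

-- 'for i in range(len(l[0])):' over (done, rest) with pop-front pivot and comprehensions
def pvLoopB (done rest : List (List Int)) : List Nat → List (List Int)
  | [] => done ++ rest
  | i :: is =>
    if rest = [] then done ++ rest
    else match rest.findIdx? (fun r => decide (r.getD i 0 ≠ 0)) with
      | none => pvLoopB done rest is
      | some j =>
        let piv := rest.getD j []
        let rest2 := ((rest.set j (rest.getD 0 [])).tail)
        pvLoopB (done.map (pvElimRowB i piv) ++ [piv]) (rest2.map (pvElimRowB i piv)) is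

def F2sweep_alt (l : List (List Int)) : List (List Int) :=
  pvLoopB [] l (List.range (l.getD 0 []).length)

-- ===== PRECONDITION & SPEC =====
-- Pre_ excludes the empty list (A raises IndexError on l[0]) and non-rectangular matrices,
-- on which A raises IndexError for most shapes and otherwise its value depends on accidental
-- row-length trimming by the inner k-loop.
def Pre_F2sweep (l : List (List Int)) : Prop :=
  l ≠ [] ∧ ∀ r ∈ l, r.length = (l.getD 0 []).length
instance (l : List (List Int)) : Decidable (Pre_F2sweep l) := by unfold Pre_F2sweep; infer_instance

def pvWitness_F2sweep : List (List Int) := [[1, 0, 1], [1, 1, 0]]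

def Spec_F2sweep (l : List (List Int)) (out : List (List Int)) : Prop := out = F2sweep_alt l
instance (l : List (List Int)) (out : List (List Int)) : Decidable (Spec_F2sweep l out) := by unfold Spec_F2sweep; infer_instance

-- ===== CLAIM (what is proved, stated in full; the proofs are below) =====
def Claim_equal_F2sweep : Prop := ∀ (l : List (List Int)), Dom_F2sweep l → Pre_F2sweep l → Spec_F2sweep l (F2sweep l)

-- ===== LEMMAS AND PROOFS =====

-- proof-only: A's per-row elimination guarded by the nonzero test at column i
def pvG (i : Nat) (piv row : List Int) : List Int :=
  if row.getD i 0 ≠ 0 then pvElimRowA piv row else row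

theorem pvGetD_set {α : Type} (l : List α) (n : Nat) (a d : α) (j : Nat) :
    (l.set n a).getD j d = if n = j ∧ j < l.length then a else l.getD j d := by
  rcases Nat.decEq n j with h | h
  · simp [List.getD, *]
  · subst h
    by_cases hl : n < l.length
    · simp [List.getD, hl]
    · rw [List.set_eq_of_length_le (by omega)]
      simp [hl]

theorem pvRowFold (h : Nat → Int → Int) :
    ∀ (b a : Nat) (r : List Int),
      ((List.range' a b).foldl (fun r k => r.set k (h k (r.getD k 0))) r).length = r.length ∧
      ∀ j, ((List.range' a b).foldl (fun r k => r.set k (h k (r.getD k 0))) r).getD j 0 =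
        if a ≤ j ∧ j < a + b ∧ j < r.length then h j (r.getD j 0) else r.getD j 0 := by
  intro b
  induction b with
  | zero =>
    intro a r
    refine ⟨rfl, fun j => ?_⟩
    rw [if_neg (by omega)]
    rfl
  | succ b ih =>
    intro a r
    have hstep : (List.range' a (b+1)).foldl (fun r k => r.set k (h k (r.getD k 0))) r
        = (List.range' (a+1) b).foldl (fun r k => r.set k (h k (r.getD k 0)))
            (r.set a (h a (r.getD a 0))) := rfl
    obtain ⟨ihl, ihd⟩ := ih (a+1) (r.set a (h a (r.getD a 0)))
    constructor
    · rw [hstep, ihl]; simp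
    · intro j
      rw [hstep, ihd j, pvGetD_set]
      simp only [List.length_set]
      by_cases h1 : a = j
      · subst h1
        by_cases h2 : a < r.length
        · simp [h2]
        · simp [h2]
      · by_cases h2 : a + 1 ≤ j ∧ j < a + 1 + b ∧ j < r.length <;>
          simp [h1, h2] <;> omega

theorem pvElimRowA_eq (piv row : List Int) (hl : row.length = piv.length) :
    pvElimRowA piv row = List.zipWith (fun x p => PySem.Int.mod (x - p) 2) row piv := by
  obtain ⟨hlen, hget⟩ :=
    pvRowFold (fun k x => PySem.Int.mod (x - piv.getD k 0) 2) piv.length 0 row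
  unfold pvElimRowA
  rw [List.range_eq_range']
  apply List.ext_getElem
  · rw [hlen]; simp [hl]
  · intro j hj1 hj2
    have hjr : j < row.length := by rw [hlen] at hj1; exact hj1
    have hjp : j < piv.length := by omega
    rw [← List.getD_eq_getElem _ 0 hj1, hget j,
        if_pos ⟨Nat.zero_le j, by omega, hjr⟩, List.getElem_zipWith,
        List.getD_eq_getElem row 0 hjr, List.getD_eq_getElem piv 0 hjp]

theorem pvMatFold (cnt i : Nat) :
    ∀ (b a : Nat) (m : List (List Int)),
      ((List.range' a b).foldl (fun acc j => if j = cnt then acc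
        else if pvEntryA acc j i ≠ 0 then
          acc.set j (pvElimRowA (acc.getD cnt []) (acc.getD j [])) else acc) m).length
        = m.length ∧
      ∀ j, ((List.range' a b).foldl (fun acc j => if j = cnt then acc
        else if pvEntryA acc j i ≠ 0 then
          acc.set j (pvElimRowA (acc.getD cnt []) (acc.getD j [])) else acc) m).getD j [] =
        if a ≤ j ∧ j < a + b ∧ j < m.length ∧ j ≠ cnt
        then pvG i (m.getD cnt []) (m.getD j []) else m.getD j [] := by
  intro b
  induction b with
  | zero =>
    intro a m
    refine ⟨rfl, fun j => ?_⟩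
    rw [if_neg (by omega)]
    rfl
  | succ b ih =>
    intro a m
    set step : List (List Int) → Nat → List (List Int) := fun acc j => if j = cnt then acc
      else if pvEntryA acc j i ≠ 0 then
        acc.set j (pvElimRowA (acc.getD cnt []) (acc.getD j [])) else acc with hstep
    have hfold : (List.range' a (b+1)).foldl step m
        = (List.range' (a+1) b).foldl step (step m a) := rfl
    have hsa : step m a = if a = cnt then m else if pvEntryA m a i ≠ 0 then
        m.set a (pvElimRowA (m.getD cnt []) (m.getD a [])) else m := rfl
    have hlen1 : (step m a).length = m.length := by
      rw [hsa]; split_ifs <;> simp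
    have hcnt : (step m a).getD cnt [] = m.getD cnt [] := by
      rw [hsa]
      by_cases h1 : a = cnt
      · rw [if_pos h1]
      · rw [if_neg h1]
        by_cases h2 : pvEntryA m a i ≠ 0
        · rw [if_pos h2, pvGetD_set, if_neg (fun h => h1 h.1)]
        · rw [if_neg h2]
    have hj' : ∀ j, (step m a).getD j [] =
        if a = j ∧ j < m.length ∧ j ≠ cnt
        then pvG i (m.getD cnt []) (m.getD j []) else m.getD j [] := by
      intro j
      rw [hsa]
      by_cases h1 : a = cnt
      · rw [if_pos h1]
        by_cases hja : a = j
        · rw [if_neg (by rw [← hja, h1]; tauto)]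
        · rw [if_neg (by tauto)]
      · rw [if_neg h1]
        by_cases h2 : pvEntryA m a i ≠ 0
        · rw [if_pos h2, pvGetD_set]
          by_cases hja : a = j
          · subst hja
            by_cases hl : a < m.length
            · rw [if_pos ⟨rfl, hl⟩, if_pos ⟨rfl, hl, h1⟩]
              unfold pvG
              rw [if_pos (by simpa [pvEntryA] using h2)]
            · rw [if_neg (by tauto), if_neg (by tauto)]
          · rw [if_neg (by tauto), if_neg (by tauto)]
        · rw [if_neg h2]
          by_cases hja : a = j
          · subst hja
            by_cases hrest : a < m.length ∧ a ≠ cnt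
            · rw [if_pos ⟨rfl, hrest.1, hrest.2⟩]
              unfold pvG
              rw [if_neg (by simpa [pvEntryA] using h2)]
            · rw [if_neg (by tauto)]
          · rw [if_neg (by tauto)]
    obtain ⟨ihl, ihd⟩ := ih (a+1) (step m a)
    refine ⟨by rw [hfold, ihl, hlen1], fun j => ?_⟩
    rw [hfold, ihd j, hlen1, hcnt, hj' j]
    by_cases h1 : a = j
    · subst h1
      rw [if_neg (by omega)]
      by_cases h2 : a < m.length ∧ a ≠ cnt
      · rw [if_pos ⟨rfl, h2.1, h2.2⟩, if_pos ⟨le_refl a, by omega, h2.1, h2.2⟩]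
      · rw [if_neg (by tauto), if_neg (by omega)]
    · by_cases h2 : a + 1 ≤ j ∧ j < a + 1 + b ∧ j < m.length ∧ j ≠ cnt
      · rw [if_pos h2, if_neg (fun h => h1 h.1), if_pos (by omega)]
      · rw [if_neg h2, if_neg (fun h => h1 h.1), if_neg (by omega)]

theorem pvElimAllA_eq (i : Nat) (done rest : List (List Int)) (piv : List Int) :
    pvElimAllA (done ++ piv :: rest) done.length i
      = done.map (pvG i piv) ++ piv :: rest.map (pvG i piv) := by
  unfold pvElimAllA
  rw [List.range_eq_range']
  obtain ⟨hlen, hget⟩ :=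
    pvMatFold done.length i (done ++ piv :: rest).length 0 (done ++ piv :: rest)
  have hcntv : (done ++ piv :: rest).getD done.length [] = piv := by
    rw [List.getD_append_right _ _ _ _ (le_refl _)]
    simp
  apply List.ext_getElem
  · rw [hlen]; simp
  · intro j hj1 hj2
    have hjm : j < (done ++ piv :: rest).length := by rw [← hlen]; exact hj1
    rw [← List.getD_eq_getElem _ [] hj1, hget j, hcntv,
        ← List.getD_eq_getElem _ [] hj2]
    rcases Nat.lt_trichotomy j done.length with hc | hc | hc
    · rw [if_pos ⟨Nat.zero_le j, by omega, hjm, by omega⟩,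
          List.getD_append _ _ _ _ hc, List.getD_append _ _ _ _ (by simpa using hc)]
      rw [List.getD_eq_getElem _ [] hc, List.getD_eq_getElem _ [] (by simpa using hc),
          List.getElem_map]
    · subst hc
      have hR : (List.map (pvG i piv) done ++ piv :: List.map (pvG i piv) rest).getD
          done.length [] = piv := by
        rw [List.getD_append_right _ _ _ _ (by simp)]
        simp
      rw [if_neg (by omega), hcntv, hR]
    · rw [if_pos ⟨Nat.zero_le j, by omega, hjm, by omega⟩,
          List.getD_append_right _ _ _ _ (by omega),
          List.getD_append_right _ _ _ _ (by simp; omega)]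
      simp only [List.length_map]
      obtain ⟨k, hk⟩ : ∃ k, j - done.length = k + 1 := ⟨j - done.length - 1, by omega⟩
      rw [hk]
      simp only [List.getD_cons_succ]
      have hkr : k < rest.length := by
        simp at hjm; omega
      rw [List.getD_eq_getElem _ [] hkr, List.getD_eq_getElem _ [] (by simpa using hkr),
          List.getElem_map]

theorem pvSwap_eq (done rest : List (List Int)) (j : Nat) (hj : j < rest.length) :
    ((done ++ rest).set done.length ((done ++ rest).getD (done.length + j) [])).set
      (done.length + j) ((done ++ rest).getD done.length [])
      = done ++ (rest.getD j []) :: ((rest.set j (rest.getD 0 [])).tail) := by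
  have h1 : (done ++ rest).getD (done.length + j) [] = rest.getD j [] := by
    rw [List.getD_append_right _ _ _ _ (by omega)]
    simp
  have h2 : (done ++ rest).getD done.length [] = rest.getD 0 [] := by
    rw [List.getD_append_right _ _ _ _ (le_refl _)]
    simp
  rw [h1, h2, List.set_append, if_neg (by omega), Nat.sub_self,
      List.set_append, if_neg (by omega), Nat.add_sub_cancel_left]
  congr 1
  cases rest with
  | nil => simp at hj
  | cons r rs =>
    cases j with
    | zero => simp
    | succ k => simp [List.set]

theorem pvFindIdx?_some {α : Type} (p : α → Bool) (d : α) :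
    ∀ (l : List α) (j : Nat), List.findIdx? p l = some j → j < l.length ∧ p (l.getD j d) = true := by
  intro l
  induction l with
  | nil => intro j h; simp at h
  | cons a t ih =>
    intro j h
    rw [List.findIdx?_cons] at h
    by_cases hp : p a
    · rw [if_pos hp] at h
      cases h
      exact ⟨Nat.succ_pos _, hp⟩
    · rw [if_neg hp] at h
      rcases Option.map_eq_some_iff.mp h with ⟨k, hk, rfl⟩
      obtain ⟨h1, h2⟩ := ih k hk
      exact ⟨by simpa using h1, by simpa using h2⟩

theorem pvSearch_eq (i : Nat) :
    ∀ (rest done : List (List Int)),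
      pvSearchA (done ++ rest) i (List.range' done.length rest.length)
        = (List.findIdx? (fun r => decide (r.getD i 0 ≠ 0)) rest).map
            (fun j => done.length + j) := by
  intro rest
  induction rest with
  | nil => intro done; rfl
  | cons r rs ih =>
    intro done
    have hr : pvEntryA (done ++ r :: rs) done.length i = r.getD i 0 := by
      unfold pvEntryA
      rw [List.getD_append_right _ _ _ _ (le_refl _)]
      simp
    have hrange : List.range' done.length (r :: rs).length
        = done.length :: List.range' (done.length + 1) rs.length := rfl
    rw [hrange]
    simp only [pvSearchA]
    by_cases h : r.getD i 0 ≠ 0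
    · rw [if_pos (by rw [hr]; exact h), List.findIdx?_cons, if_pos (by simpa using h)]
      rfl
    · rw [if_neg (by rw [hr]; exact h), List.findIdx?_cons, if_neg (by simpa using h)]
      have hsplit : done ++ r :: rs = (done ++ [r]) ++ rs := by simp
      have hlen : done.length + 1 = (done ++ [r]).length := by simp
      rw [hsplit, hlen, ih (done ++ [r])]
      cases hfi : List.findIdx? (fun r => decide (r.getD i 0 ≠ 0)) rs with
      | none => simp
      | some k => simp; omega

theorem pvLoopB_nil (done : List (List Int)) (cols : List Nat) :
    pvLoopB done [] cols = done := by
  cases cols with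
  | nil => simp [pvLoopB]
  | cons i is => simp [pvLoopB]

theorem pvElimRowB_length (i : Nat) (piv row : List Int) (h : row.length = piv.length) :
    (pvElimRowB i piv row).length = row.length := by
  unfold pvElimRowB
  split_ifs <;> simp [h]

theorem pvMain : ∀ (cols : List Nat) (done rest : List (List Int)) (w : Nat),
    rest ≠ [] → (∀ r ∈ done, r.length = w) → (∀ r ∈ rest, r.length = w) →
    pvLoopA (done ++ rest) done.length cols = pvLoopB done rest cols := by
  intro cols
  induction cols with
  | nil => intro done rest w _ _ _; rfl
  | cons i is ih =>
    intro done rest w hne hd hr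
    have hlen : (done ++ rest).length - done.length = rest.length := by simp
    simp only [pvLoopA, pvLoopB]
    rw [if_neg hne, hlen, pvSearch_eq i rest done]
    cases hf : List.findIdx? (fun r => decide (r.getD i 0 ≠ 0)) rest with
    | none =>
      simp only [Option.map_none]
      have hz : pvEntryA (done ++ rest) done.length i = 0 := by
        cases rest with
        | nil => exact absurd rfl hne
        | cons r0 rs =>
          have := (List.findIdx?_eq_none_iff.mp hf) r0 (by simp)
          simp at this
          unfold pvEntryA
          rw [List.getD_append_right _ _ _ _ (le_refl _)]
          simpa using this
      rw [if_pos hz]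
      exact ih done rest w hne hd hr
    | some j =>
      obtain ⟨hjlt, hjp⟩ := pvFindIdx?_some _ [] rest j hf
      have hpne : (rest.getD j []).getD i 0 ≠ 0 := by simpa using hjp
      simp only [Option.map_some]
      rw [pvSwap_eq done rest j hjlt]
      have hent : pvEntryA (done ++ (rest.getD j []) :: ((rest.set j (rest.getD 0 [])).tail))
          done.length i = (rest.getD j []).getD i 0 := by
        unfold pvEntryA
        rw [List.getD_append_right _ _ _ _ (le_refl _)]
        simp
      rw [if_neg (by rw [hent]; exact hpne), pvElimAllA_eq]
      have hwpiv : (rest.getD j []).length = w := by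
        apply hr
        rw [List.getD_eq_getElem _ [] hjlt]
        exact List.getElem_mem hjlt
      have hw2 : ∀ r ∈ (rest.set j (rest.getD 0 [])).tail, r.length = w := by
        intro r hm
        rcases List.mem_or_eq_of_mem_set (List.mem_of_mem_tail hm) with h | h
        · exact hr r h
        · subst h
          apply hr
          have h0 : 0 < rest.length := List.length_pos_iff.mpr hne
          rw [List.getD_eq_getElem _ [] h0]
          exact List.getElem_mem h0
      have hmapd : done.map (pvG i (rest.getD j []))
          = done.map (pvElimRowB i (rest.getD j [])) := by
        apply List.map_congr_left
        intro r hm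
        unfold pvG pvElimRowB
        split_ifs with h
        · exact pvElimRowA_eq _ _ (by rw [hd r hm, hwpiv])
        · rfl
      have hmapr : (rest.set j (rest.getD 0 [])).tail.map (pvG i (rest.getD j []))
          = (rest.set j (rest.getD 0 [])).tail.map (pvElimRowB i (rest.getD j [])) := by
        apply List.map_congr_left
        intro r hm
        unfold pvG pvElimRowB
        split_ifs with h
        · exact pvElimRowA_eq _ _ (by rw [hw2 r hm, hwpiv])
        · rfl
      rw [hmapd, hmapr]
      by_cases hb : (rest.set j (rest.getD 0 [])).tail.map (pvElimRowB i (rest.getD j [])) = []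
      · rw [hb, pvLoopB_nil, if_pos (by simp)]
      · have hd' : ∀ r ∈ done.map (pvElimRowB i (rest.getD j [])) ++ [rest.getD j []],
            r.length = w := by
          intro r hm
          rcases List.mem_append.mp hm with h | h
          · obtain ⟨r0, hr0, rfl⟩ := List.mem_map.mp h
            rw [pvElimRowB_length _ _ _ (by rw [hd r0 hr0, hwpiv])]
            exact hd r0 hr0
          · simp at h
            subst h
            exact hwpiv
        have hr' : ∀ r ∈ (rest.set j (rest.getD 0 [])).tail.map (pvElimRowB i (rest.getD j [])),
            r.length = w := by
          intro r hm
          obtain ⟨r0, hr0, rfl⟩ := List.mem_map.mp hm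
          rw [pvElimRowB_length _ _ _ (by rw [hw2 r0 hr0, hwpiv])]
          exact hw2 r0 hr0
        have hpos : 0 < ((rest.set j (rest.getD 0 [])).tail.map
            (pvElimRowB i (rest.getD j []))).length := List.length_pos_iff.mpr hb
        rw [if_neg (by simp at hpos ⊢; omega)]
        have H := ih (done.map (pvElimRowB i (rest.getD j [])) ++ [rest.getD j []])
          ((rest.set j (rest.getD 0 [])).tail.map (pvElimRowB i (rest.getD j []))) w hb hd' hr'
        simpa using H


-- ===== VERDICT (by name: the statement is the Claim_ definition above) =====
theorem F2sweep_spec : Claim_equal_F2sweep := by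
  intro l _hd hpre
  unfold Spec_F2sweep F2sweep F2sweep_alt
  have := pvMain (List.range (l.getD 0 []).length) [] l ((l.getD 0 []).length)
    hpre.1 (by simp) hpre.2
  simpa using this
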